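-- pv_equiv track=rewrite | github.com/colevahey/interview-prep | river_sizes/river_sizes.py | riverSizes
-- ===== SOURCE A (Python) =====
-- def get_neighbors(i, j, matrix):
--     neighbors = []
--     moves = [
--             (0,1),
--             (1,0),
--             (0,-1),
--             (-1,0)
--             ]
--     for ix, jx in moves:
--         newi = i + ix
--         newj = j + jx
--         if newi >= 0 and newi < len(matrix) and newj >= 0 and newj < len(matrix[0]):
--             neighbors.append((newi, newj))
--
--     return neighbors
--
-- def find_size(i, j, matrix, visited):
--     size = 1
--     for newi, newj in get_neighbors(i, j, matrix):
--         if matrix[newi][newj] == 1 and (newi, newj) not in visited: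
--             visited.append((newi, newj))
--             size += find_size(newi, newj, matrix, visited)
--
--     return size
--
-- def riverSizes(matrix):
--     visited = []
--     sizes = []
--     for i, row in enumerate(matrix):
--         for j, value in enumerate(row):
--             if value == 1:
--                 if (i, j) not in visited:
--                     visited.append((i, j))
--                     size = find_size(i, j, matrix, visited)
--                     sizes.append(size)
--
--     return sizes
-- ===== SOURCE B (Python) =====
-- def riverSizes(matrix):
--     # Iterative flood fill: explicit worklist with a moving head pointer and a
--     # visited set (marked at push time), instead of a recursive DFS.
--     visited = set()
--     sizes = []
--     for i, row in enumerate(matrix):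
--         for j, value in enumerate(row):
--             if value == 1 and (i, j) not in visited:
--                 visited.add((i, j))
--                 work = [(i, j)]
--                 head = 0
--                 while head < len(work):
--                     ci, cj = work[head]
--                     head += 1
--                     for ni, nj in ((ci, cj + 1), (ci + 1, cj), (ci, cj - 1), (ci - 1, cj)):
--                         if 0 <= ni < len(matrix) and 0 <= nj < len(matrix[0]) \
--                                 and matrix[ni][nj] == 1 and (ni, nj) not in visited:
--                             visited.add((ni, nj))
--                             work.append((ni, nj))
--                 sizes.append(len(work))
--     return sizes
-- ===== Notes on version B (the rewrite author's own statement) =====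
-- stated objective: alternative
-- what changed: Replaces A's recursive DFS with a visited list by an iterative flood fill over an explicit worklist with a head pointer and a hash-set visited, marking cells at push time; a component's size is the final worklist length. Pre_ excludes exactly the ragged matrices on which A raises IndexError (a 1-cell with an in-rectangle neighbour falling beyond its shorter row).
import Mathlib
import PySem

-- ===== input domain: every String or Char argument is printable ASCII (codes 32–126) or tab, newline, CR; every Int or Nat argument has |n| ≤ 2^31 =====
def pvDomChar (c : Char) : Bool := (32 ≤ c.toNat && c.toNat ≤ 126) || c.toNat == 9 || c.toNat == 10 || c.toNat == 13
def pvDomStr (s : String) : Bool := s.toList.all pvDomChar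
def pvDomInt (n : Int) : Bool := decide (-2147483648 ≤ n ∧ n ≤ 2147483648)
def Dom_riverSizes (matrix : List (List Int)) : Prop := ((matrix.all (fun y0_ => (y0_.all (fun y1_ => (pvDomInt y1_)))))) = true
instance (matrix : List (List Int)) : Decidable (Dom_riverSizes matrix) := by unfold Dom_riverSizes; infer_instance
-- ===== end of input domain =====

-- B replaces A's recursive DFS over a visited LIST by an iterative flood fill with an
-- explicit worklist (head pointer) and a visited SET, marking cells at push time.

-- shared helpers (mirroring the Python expressions; `val` is matrix[i][j], exact under Pre_)
abbrev pvVal (m : List (List Int)) (c : Int × Int) : Int :=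
  PySem.List.pyGetD (PySem.List.pyGetD m c.1 []) c.2 0

abbrev pvInRect (m : List (List Int)) (c : Int × Int) : Prop :=
  0 ≤ c.1 ∧ c.1 < (m.length : Int) ∧ 0 ≤ c.2 ∧ c.2 < ((m.headD []).length : Int)

def pvNbrs (c : Int × Int) : List (Int × Int) :=
  [(c.1, c.2 + 1), (c.1 + 1, c.2), (c.1, c.2 - 1), (c.1 - 1, c.2)]

-- ===== PORT A =====
def pvMoves : List (Int × Int) := [(0, 1), (1, 0), (0, -1), (-1, 0)]

def getNeighbors (i j : Int) (m : List (List Int)) : List (Int × Int) :=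
  pvMoves.foldl
    (fun acc mv =>
      if pvInRect m (i + mv.1, j + mv.2) then acc ++ [(i + mv.1, j + mv.2)] else acc)
    []

def findSize (fuel : Nat) (i j : Int) (m : List (List Int)) (visited : List (Int × Int)) :
    Int × List (Int × Int) :=
  match fuel with
  | 0 => (1, visited)                 -- fuel never runs out on admitted inputs (proved below)
  | fuel + 1 =>
    (getNeighbors i j m).foldl
      (fun st c =>
        if pvVal m c = 1 ∧ c ∉ st.2 then
          let r := findSize fuel c.1 c.2 m (st.2 ++ [c])
          (st.1 + r.1, r.2)
        else st)
      (1, visited)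

def riverSizes (matrix : List (List Int)) : List Int :=
  let fuel := matrix.length * (matrix.headD []).length + 2
  ((PySem.List.enumerate matrix).foldl
    (fun (st : List (Int × Int) × List Int) p =>
      (PySem.List.enumerate p.2).foldl
        (fun st q =>
          if q.2 = 1 then
            if (p.1, q.1) ∉ st.1 then
              let r := findSize fuel p.1 q.1 matrix (st.1 ++ [(p.1, q.1)])
              (r.2, st.2 ++ [r.1])
            else st
          else st)
        st)
    ([], [])).2

-- ===== PORT B =====
def bfsLoop (fuel : Nat) (m : List (List Int)) (work : List (Int × Int)) (head : Nat)
    (visited : PySem.Set (Int × Int)) : List (Int × Int) × PySem.Set (Int × Int) :=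
  match fuel with
  | 0 => (work, visited)              -- fuel never runs out on admitted inputs (proved below)
  | fuel + 1 =>
    if h : head < work.length then
      let st := (pvNbrs work[head]).foldl
        (fun (st : List (Int × Int) × PySem.Set (Int × Int)) n =>
          if pvInRect m n ∧ pvVal m n = 1 ∧ n ∉ st.2
          then (st.1 ++ [n], PySem.Set.add st.2 n) else st)
        (work, visited)
      bfsLoop fuel m st.1 (head + 1) st.2
    else (work, visited)

def riverSizes_alt (matrix : List (List Int)) : List Int :=
  let fuel := matrix.length * (matrix.headD []).length + 2
  ((PySem.List.enumerate matrix).foldl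
    (fun (st : PySem.Set (Int × Int) × List Int) p =>
      (PySem.List.enumerate p.2).foldl
        (fun st q =>
          if q.2 = 1 ∧ (p.1, q.1) ∉ st.1 then
            let r := bfsLoop fuel matrix [(p.1, q.1)] 0 (PySem.Set.add st.1 (p.1, q.1))
            (r.2, st.2 ++ [(r.1.length : Int)])
          else st)
        st)
    ([], [])).2

-- ===== PRECONDITION & SPEC =====
-- Pre_ excludes exactly the inputs on which A raises IndexError: a ragged matrix where some
-- 1-cell has an in-rectangle neighbour (bounds taken from row 0) falling beyond its own
-- shorter row, so matrix[ni][nj] is out of range.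
def Pre_riverSizes (matrix : List (List Int)) : Prop :=
  ∀ i : Fin matrix.length, ∀ j : Fin matrix[i].length,
    matrix[i][j] = 1 →
    ∀ d ∈ pvNbrs ((i : Int), (j : Int)), pvInRect matrix d →
      d.2 < ((PySem.List.pyGetD matrix d.1 []).length : Int)
instance (matrix : List (List Int)) : Decidable (Pre_riverSizes matrix) := by
  unfold Pre_riverSizes; infer_instance

def pvWitness_riverSizes : List (List Int) := [[1, 0, 1], [1, 1, 0]]

def Spec_riverSizes (matrix : List (List Int)) (out : List Int) : Prop := out = riverSizes_alt matrix
instance (matrix : List (List Int)) (out : List Int) : Decidable (Spec_riverSizes matrix out) := by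
  unfold Spec_riverSizes; infer_instance

-- ===== CLAIM (what is proved, stated in full; the proofs are below) =====
def Claim_equal_riverSizes : Prop := ∀ (matrix : List (List Int)), Dom_riverSizes matrix → Pre_riverSizes matrix → Spec_riverSizes matrix (riverSizes matrix)


-- ===== LEMMAS AND PROOFS =====

-- a cell is eligible when it lies in the row-0 rectangle and holds a 1
abbrev pvElig (m : List (List Int)) (c : Int × Int) : Prop := pvInRect m c ∧ pvVal m c = 1

-- reachability through eligible cells avoiding V, from origin c (excluding c itself)
inductive pvNR (m : List (List Int)) (V : List (Int × Int)) : (Int × Int) → (Int × Int) → Prop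
  | base {c d} : d ∈ pvNbrs c → pvElig m d → d ∉ V → pvNR m V c d
  | step {c d e} : pvNR m V c d → e ∈ pvNbrs d → pvElig m e → e ∉ V → pvNR m V c e

theorem pvNR_anti {m : List (List Int)} {V V' : List (Int × Int)} {c d : Int × Int}
    (h : ∀ x ∈ V, x ∈ V') : pvNR m V' c d → pvNR m V c d := by
  intro hn
  induction hn with
  | base h1 h2 h3 => exact .base h1 h2 (fun hx => h3 (h _ hx))
  | step _ h1 h2 h3 ih => exact .step ih h1 h2 (fun hx => h3 (h _ hx))

theorem pvNR_congr {m : List (List Int)} {V V' : List (Int × Int)} {c d : Int × Int}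
    (h : ∀ x, x ∈ V ↔ x ∈ V') : pvNR m V c d ↔ pvNR m V' c d :=
  ⟨pvNR_anti (fun x hx => (h x).2 hx), pvNR_anti (fun x hx => (h x).1 hx)⟩

theorem pvNR_chain {m : List (List Int)} {V : List (Int × Int)} {c d x : Int × Int}
    (h1 : d ∈ pvNbrs c) (h2 : pvElig m d) (h3 : d ∉ V) :
    pvNR m V d x → pvNR m V c x := by
  intro hn
  induction hn with
  | base a b c' => exact .step (.base h1 h2 h3) a b c'
  | step _ a b c' ih => exact .step ih a b c'

-- any set S closed under eligible neighbours of {c} ∪ S (relative to vis) contains all pvNR cells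
theorem pvNR_subset {m : List (List Int)} {vis S : List (Int × Int)} {c : Int × Int}
    (hclosed : ∀ x, (x = c ∨ x ∈ S) → ∀ d ∈ pvNbrs x, pvElig m d → d ∈ vis ++ S) :
    ∀ x, pvNR m vis c x → x ∈ S := by
  intro x hx
  induction hx with
  | base h1 h2 h3 =>
    have := hclosed c (Or.inl rfl) _ h1 h2
    rcases List.mem_append.1 this with h | h
    · exact absurd h h3
    · exact h
  | step _ h1 h2 h3 ih =>
    have := hclosed _ (Or.inr ih) _ h1 h2
    rcases List.mem_append.1 this with h | h
    · exact absurd h h3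
    · exact h

-- the rectangle cell list, for fuel counting
def pvRect (m : List (List Int)) : List (Int × Int) :=
  (List.range m.length).flatMap
    (fun a => (List.range (m.headD []).length).map (fun b => ((a : Int), (b : Int))))

def pvCnt (m : List (List Int)) (vis : List (Int × Int)) : Nat :=
  (pvRect m).countP (fun x => decide (pvElig m x ∧ x ∉ vis))

theorem pvRect_length (m : List (List Int)) :
    (pvRect m).length = m.length * (m.headD []).length := by
  simp [pvRect, List.length_flatMap]

theorem pvRect_mem {m : List (List Int)} {c : Int × Int} (h : pvInRect m c) : c ∈ pvRect m := by
  obtain ⟨a, b⟩ := c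
  obtain ⟨h1, h2, h3, h4⟩ := h
  simp only [pvRect, List.mem_flatMap, List.mem_map, Prod.mk.injEq]
  refine ⟨a, ?_, b, ?_, rfl, rfl⟩
  · simp
    exact ⟨a.toNat, by omega, by omega⟩
  · simp
    simp only [List.headD_eq_head?_getD] at h4
    exact ⟨b.toNat, by omega, by omega⟩

theorem pvCnt_le (m : List (List Int)) (vis : List (Int × Int)) :
    pvCnt m vis ≤ m.length * (m.headD []).length := by
  calc pvCnt m vis ≤ (pvRect m).length := List.countP_le_length
  _ = m.length * (m.headD []).length := pvRect_length m

theorem pvCnt_mono {m : List (List Int)} {vis vis' : List (Int × Int)}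
    (h : ∀ x ∈ vis, x ∈ vis') : pvCnt m vis' ≤ pvCnt m vis := by
  apply List.countP_mono_left
  intro x _ hx
  simp only [decide_eq_true_eq] at hx ⊢
  exact ⟨hx.1, fun hm => hx.2 (h x hm)⟩

theorem countP_lt_aux {α : Type} {p q : α → Bool} :
    ∀ (l : List α) (c : α), c ∈ l → (∀ x, q x = true → p x = true) →
      p c = true → q c = false → l.countP q < l.countP p := by
  intro l
  induction l with
  | nil => simp
  | cons a l ih =>
    intro c hc himp hp hq
    rcases List.mem_cons.1 hc with rfl | hc
    · have hm : l.countP q ≤ l.countP p := List.countP_mono_left (fun x _ h => himp x h)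
      simp [hq, hp]
      omega
    · have := ih c hc himp hp hq
      have h2 : q a = true → p a = true := himp a
      simp only [List.countP_cons]
      split_ifs <;> simp_all
      omega

theorem pvCnt_lt {m : List (List Int)} {vis : List (Int × Int)} {c : Int × Int}
    (he : pvElig m c) (hv : c ∉ vis) : pvCnt m (vis ++ [c]) < pvCnt m vis := by
  apply countP_lt_aux _ c (pvRect_mem he.1)
  · intro x hx
    simp only [decide_eq_true_eq] at hx ⊢
    exact ⟨hx.1, fun hm => hx.2 (List.mem_append_left _ hm)⟩
  · simp only [decide_eq_true_eq]
    exact ⟨he, hv⟩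
  · simp

theorem pvCnt_append {m : List (List Int)} {vis k : List (Int × Int)}
    (hk : k.Nodup) (h : ∀ x ∈ k, pvElig m x ∧ x ∉ vis) :
    pvCnt m (vis ++ k) + k.length ≤ pvCnt m vis := by
  induction k generalizing vis with
  | nil => simp
  | cons x k ih =>
    obtain ⟨hx, hk'⟩ := List.nodup_cons.1 hk
    have h1 : pvCnt m (vis ++ [x]) < pvCnt m vis := pvCnt_lt (h x (by simp)).1 (h x (by simp)).2
    have h2 : pvCnt m ((vis ++ [x]) ++ k) + k.length ≤ pvCnt m (vis ++ [x]) := by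
      apply ih hk'
      intro y hy
      refine ⟨(h y (by simp [hy])).1, ?_⟩
      simp only [List.mem_append, List.mem_singleton]
      rintro (hm | rfl)
      · exact (h y (by simp [hy])).2 hm
      · exact hx hy
    have : vis ++ x :: k = (vis ++ [x]) ++ k := by simp
    rw [this]
    simp only [List.length_cons]
    omega

theorem mem_foldGN {m : List (List Int)} {i j : Int} {d : Int × Int} :
    ∀ (mvs : List (Int × Int)) (acc : List (Int × Int)),
    (d ∈ mvs.foldl (fun acc mv => if pvInRect m (i + mv.1, j + mv.2) then acc ++ [(i + mv.1, j + mv.2)] else acc) acc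
      ↔ d ∈ acc ∨ ∃ mv ∈ mvs, d = (i + mv.1, j + mv.2) ∧ pvInRect m d) := by
  intro mvs
  induction mvs with
  | nil => simp
  | cons mv mvs ih =>
    intro acc
    simp only [List.foldl_cons]
    by_cases h : pvInRect m (i + mv.1, j + mv.2)
    · rw [if_pos h, ih]
      simp only [List.mem_append, List.mem_cons, List.not_mem_nil, or_false]
      constructor
      · rintro ((ha | rfl) | ⟨mv', hm, rfl, hr⟩)
        · exact Or.inl ha
        · exact Or.inr ⟨mv, Or.inl rfl, rfl, h⟩
        · exact Or.inr ⟨mv', Or.inr hm, rfl, hr⟩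
      · rintro (ha | ⟨mv', hm | hm, rfl, hr⟩)
        · exact Or.inl (Or.inl ha)
        · subst hm; exact Or.inl (Or.inr rfl)
        · exact Or.inr ⟨mv', hm, rfl, hr⟩
    · rw [if_neg h, ih]
      simp only [List.mem_cons]
      constructor
      · rintro (ha | ⟨mv', hm, rfl, hr⟩)
        · exact Or.inl ha
        · exact Or.inr ⟨mv', Or.inr hm, rfl, hr⟩
      · rintro (ha | ⟨mv', hm | hm, rfl, hr⟩)
        · exact Or.inl ha
        · subst hm; exact absurd hr h
        · exact Or.inr ⟨mv', hm, rfl, hr⟩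

theorem mem_getNeighbors {i j : Int} {m : List (List Int)} {d : Int × Int} :
    d ∈ getNeighbors i j m ↔ d ∈ pvNbrs (i, j) ∧ pvInRect m d := by
  rw [getNeighbors, mem_foldGN]
  simp only [pvMoves, pvNbrs, List.mem_cons, List.not_mem_nil]
  constructor
  · rintro (h | ⟨mv, hm, rfl, hr⟩)
    · simp at h
    · simp only [or_false] at hm
      rcases hm with rfl | rfl | rfl | rfl <;>
        refine ⟨?_, hr⟩ <;> simp [sub_eq_add_neg]
  · rintro ⟨hd, hr⟩
    rcases hd with rfl | rfl | rfl | rfl | h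
    · exact Or.inr ⟨(0, 1), by simp, by simp, hr⟩
    · exact Or.inr ⟨(1, 0), by simp, by simp, hr⟩
    · exact Or.inr ⟨(0, -1), by simp, by simp [sub_eq_add_neg], hr⟩
    · exact Or.inr ⟨(-1, 0), by simp, by simp [sub_eq_add_neg], hr⟩
    · simp at h

theorem pvSet_add {s : PySem.Set (Int × Int)} {x : Int × Int} (h : x ∉ s) :
    PySem.Set.add s x = s ++ [x] := by
  simp [PySem.Set.add, h]

-- ===== the A-side loop invariant =====

theorem foldA (m : List (List Int)) (fuel : Nat)
    (IH : ∀ (vis : List (Int × Int)) (c : Int × Int), pvCnt m vis < fuel →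
      ∃ new, findSize fuel c.1 c.2 m vis = ((new.length : Int) + 1, vis ++ new) ∧ new.Nodup ∧
        (∀ x ∈ new, pvElig m x ∧ x ∉ vis ∧ pvNR m vis c x) ∧
        (∀ x, (x = c ∨ x ∈ new) → ∀ d ∈ pvNbrs x, pvElig m d → d ∈ vis ++ new)) :
    ∀ (ns : List (Int × Int)) (c : Int × Int) (s0 : Int) (vis0 : List (Int × Int)),
    (∀ d ∈ ns, d ∈ pvNbrs c ∧ pvInRect m d) → pvCnt m vis0 < fuel + 1 →
    ∃ new,
      ns.foldl
        (fun st c' =>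
          if pvVal m c' = 1 ∧ c' ∉ st.2 then
            let r := findSize fuel c'.1 c'.2 m (st.2 ++ [c'])
            (st.1 + r.1, r.2)
          else st)
        (s0, vis0)
        = (s0 + (new.length : Int), vis0 ++ new) ∧
      new.Nodup ∧
      (∀ x ∈ new, pvElig m x ∧ x ∉ vis0 ∧ pvNR m vis0 c x) ∧
      (∀ d ∈ ns, pvVal m d = 1 → d ∈ vis0 ++ new) ∧
      (∀ x ∈ new, ∀ d ∈ pvNbrs x, pvElig m d → d ∈ vis0 ++ new) := by
  intro ns
  induction ns with
  | nil =>
    intro c s0 vis0 _ _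
    exact ⟨[], by simp, by simp, by simp, by simp, by simp⟩
  | cons x ns ih =>
    intro c s0 vis0 hns hcnt
    simp only [List.foldl_cons]
    by_cases hx : pvVal m x = 1 ∧ x ∉ vis0
    · have hin := hns x List.mem_cons_self
      have helig : pvElig m x := ⟨hin.2, hx.1⟩
      have h1 : pvCnt m (vis0 ++ [x]) < fuel :=
        lt_of_lt_of_le (pvCnt_lt helig hx.2) (Nat.lt_succ_iff.1 hcnt)
      obtain ⟨n1, he1, hnd1, hp1, hc1⟩ := IH (vis0 ++ [x]) x h1
      simp only [if_pos hx, he1]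
      have hsub : ∀ y ∈ vis0, y ∈ (vis0 ++ [x]) ++ n1 := by
        intro y hy; simp [hy]
      obtain ⟨n2, he2, hnd2, hp2, hd2, hc2⟩ :=
        ih c (s0 + ((n1.length : Int) + 1)) (vis0 ++ [x] ++ n1)
          (fun d hd => hns d (List.mem_cons_of_mem _ hd))
          (lt_of_le_of_lt (pvCnt_mono hsub) hcnt)
      refine ⟨x :: (n1 ++ n2), ?_, ?_, ?_, ?_, ?_⟩
      · rw [he2]
        refine Prod.ext ?_ ?_
        · simp; ring
        · simp
      · -- Nodup
        have hxn1 : x ∉ n1 := fun hm => (hp1 x hm).2.1 (by simp)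
        have hn2f : ∀ y ∈ n2, y ∉ vis0 ++ [x] ++ n1 := fun y hy => (hp2 y hy).2.1
        simp only [List.nodup_cons, List.nodup_append]
        refine ⟨?_, hnd1, hnd2, ?_⟩
        · intro hm
          rcases List.mem_append.1 hm with hm | hm
          · exact hxn1 hm
          · exact hn2f x hm (by simp)
        · rintro y hy1 z hz rfl
          exact hn2f y hz (by simp [hy1])
      · -- membership properties
        intro y hy
        rcases List.mem_cons.1 hy with rfl | hy
        · exact ⟨helig, hx.2, .base hin.1 helig hx.2⟩
        rcases List.mem_append.1 hy with hy | hy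
        · obtain ⟨hel, hnv, hnr⟩ := hp1 y hy
          have hnv0 : y ∉ vis0 := fun hm => hnv (by simp [hm])
          have hnr0 : pvNR m vis0 x y := pvNR_anti (fun z hz => by simp [hz]) hnr
          exact ⟨hel, hnv0, pvNR_chain hin.1 helig hx.2 hnr0⟩
        · obtain ⟨hel, hnv, hnr⟩ := hp2 y hy
          have hnv0 : y ∉ vis0 := fun hm => hnv (by simp [hm])
          exact ⟨hel, hnv0, pvNR_anti (fun z hz => by simp [hz]) hnr⟩
      · -- every 1-valued listed neighbour ends up visited
        intro d hd hval
        rcases List.mem_cons.1 hd with rfl | hd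
        · simp
        · have := hd2 d hd hval
          simp only [List.mem_append, List.mem_cons] at this ⊢
          tauto
      · -- closure
        intro y hy d hd hel
        have target : ∀ z, z ∈ vis0 ++ [x] ++ n1 ++ n2 → z ∈ vis0 ++ x :: (n1 ++ n2) := by
          intro z hz
          simp only [List.mem_append, List.mem_cons] at hz ⊢
          tauto
        rcases List.mem_cons.1 hy with rfl | hy
        · exact target d (by simpa using List.mem_append_left n2 (hc1 y (Or.inl rfl) d hd hel))
        rcases List.mem_append.1 hy with hy | hy
        · exact target d (by simpa using List.mem_append_left n2 (hc1 y (Or.inr hy) d hd hel))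
        · exact target d (by simpa using hc2 y hy d hd hel)
    · simp only [if_neg hx]
      obtain ⟨n2, he2, hnd2, hp2, hd2, hc2⟩ :=
        ih c s0 vis0 (fun d hd => hns d (List.mem_cons_of_mem _ hd)) hcnt
      refine ⟨n2, he2, hnd2, hp2, ?_, hc2⟩
      intro d hd hval
      rcases List.mem_cons.1 hd with rfl | hd
      · have : d ∈ vis0 := by
          by_contra hnm
          exact hx ⟨hval, hnm⟩
        simp [this]
      · exact hd2 d hd hval

theorem findSize_spec : ∀ (fuel : Nat) (m : List (List Int)) (vis : List (Int × Int))
    (c : Int × Int), pvCnt m vis < fuel →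
    ∃ new, findSize fuel c.1 c.2 m vis = ((new.length : Int) + 1, vis ++ new) ∧ new.Nodup ∧
      (∀ x ∈ new, pvElig m x ∧ x ∉ vis ∧ pvNR m vis c x) ∧
      (∀ x, (x = c ∨ x ∈ new) → ∀ d ∈ pvNbrs x, pvElig m d → d ∈ vis ++ new) := by
  intro fuel
  induction fuel with
  | zero => intro m vis c h; exact absurd h (Nat.not_lt_zero _)
  | succ fuel ihf =>
    intro m vis c h
    obtain ⟨new, he, hnd, hp, hns, hcl⟩ :=
      foldA m fuel (fun vis' c' h' => ihf m vis' c' h') (getNeighbors c.1 c.2 m) c 1 vis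
        (fun d hd => (mem_getNeighbors.1 hd)) h
    refine ⟨new, ?_, hnd, hp, ?_⟩
    · simp only [findSize]
      rw [he, add_comm]
    · intro x hx d hd hel
      rcases hx with rfl | hx
      · exact hns d (mem_getNeighbors.2 ⟨hd, hel.1⟩) hel.2
      · exact hcl x hx d hd hel

-- ===== the B-side loop invariant =====

theorem foldPush (m : List (List Int)) (c : Int × Int) :
    ∀ (ns : List (Int × Int)) (w0 : List (Int × Int)) (v0 : PySem.Set (Int × Int)),
    (∀ d ∈ ns, d ∈ pvNbrs c) →
    ∃ k,
      ns.foldl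
        (fun (st : List (Int × Int) × PySem.Set (Int × Int)) n =>
          if pvInRect m n ∧ pvVal m n = 1 ∧ n ∉ st.2
          then (st.1 ++ [n], PySem.Set.add st.2 n) else st)
        (w0, v0)
        = (w0 ++ k, v0 ++ k) ∧ k.Nodup ∧
      (∀ x ∈ k, pvElig m x ∧ x ∉ v0 ∧ x ∈ pvNbrs c) ∧
      (∀ d ∈ ns, pvElig m d → d ∈ v0 ++ k) := by
  intro ns
  induction ns with
  | nil =>
    intro w0 v0 _
    exact ⟨[], by simp, by simp, by simp, by simp⟩
  | cons n ns ih =>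
    intro w0 v0 hns
    simp only [List.foldl_cons]
    by_cases hn : pvInRect m n ∧ pvVal m n = 1 ∧ n ∉ v0
    · simp only [if_pos hn, pvSet_add hn.2.2]
      obtain ⟨k2, he2, hnd2, hp2, hq2⟩ :=
        ih (w0 ++ [n]) (v0 ++ [n]) (fun d hd => hns d (List.mem_cons_of_mem _ hd))
      refine ⟨n :: k2, ?_, ?_, ?_, ?_⟩
      · rw [he2]; simp
      · exact List.nodup_cons.2 ⟨fun hm => (hp2 n hm).2.1 (by simp), hnd2⟩
      · intro y hy
        rcases List.mem_cons.1 hy with rfl | hy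
        · exact ⟨⟨hn.1, hn.2.1⟩, hn.2.2, hns y List.mem_cons_self⟩
        · obtain ⟨hel, hnv, hnb⟩ := hp2 y hy
          exact ⟨hel, fun hm => hnv (by simp [hm]), hnb⟩
      · intro d hd hel
        rcases List.mem_cons.1 hd with rfl | hd
        · simp
        · have := hq2 d hd hel
          simp only [List.mem_append, List.mem_cons] at this ⊢
          tauto
    · simp only [if_neg hn]
      obtain ⟨k2, he2, hnd2, hp2, hq2⟩ :=
        ih w0 v0 (fun d hd => hns d (List.mem_cons_of_mem _ hd))
      refine ⟨k2, he2, hnd2, hp2, ?_⟩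
      intro d hd hel
      rcases List.mem_cons.1 hd with rfl | hd
      · have hdv : d ∈ v0 := by
          by_contra hnm
          exact hn ⟨hel.1, hel.2, hnm⟩
        simp [hdv]
      · exact hq2 d hd hel

theorem bfsLoop_spec : ∀ (fuel : Nat) (m : List (List Int)) (work : List (Int × Int))
    (head : Nat) (vis : PySem.Set (Int × Int)) (Vc : List (Int × Int)) (c0 : Int × Int),
    head ≤ work.length →
    (∀ x ∈ Vc, x ∈ vis) →
    (∀ x ∈ work.drop head, x = c0 ∨ pvNR m Vc c0 x) →
    (∀ x ∈ work.take head, ∀ d ∈ pvNbrs x, pvElig m d → d ∈ vis) →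
    (work.length - head) + pvCnt m vis < fuel →
    ∃ pushed, bfsLoop fuel m work head vis = (work ++ pushed, vis ++ pushed) ∧ pushed.Nodup ∧
      (∀ x ∈ pushed, pvElig m x ∧ x ∉ vis ∧ pvNR m Vc c0 x) ∧
      (∀ x ∈ work ++ pushed, ∀ d ∈ pvNbrs x, pvElig m d → d ∈ vis ++ pushed) := by
  intro fuel
  induction fuel with
  | zero => intro m work head vis Vc c0 _ _ _ _ hfuel; exact absurd hfuel (Nat.not_lt_zero _)
  | succ fuel ihf =>
    intro m work head vis Vc c0 hhead hVc horig hproc hfuel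
    simp only [bfsLoop]
    by_cases h : head < work.length
    · rw [dif_pos h]
      have hcmem : work[head] ∈ work.drop head := by
        have hdrop : work.drop head = work[head] :: work.drop (head + 1) :=
          List.drop_eq_getElem_cons h
        rw [hdrop]
        exact List.mem_cons_self
      have horigc := horig _ hcmem
      obtain ⟨k, hek, hndk, hpk, hqk⟩ :=
        foldPush m work[head] (pvNbrs work[head]) work vis (fun d hd => hd)
      rw [hek]
      have hkNR : ∀ x ∈ k, pvNR m Vc c0 x := by
        intro x hx
        obtain ⟨hel, hnv, hnb⟩ := hpk x hx
        have hnVc : x ∉ Vc := fun hm => hnv (hVc _ hm)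
        rcases horigc with hc | hc
        · rw [hc] at hnb
          exact .base hnb hel hnVc
        · exact .step hc hnb hel hnVc
      have hcnt : pvCnt m (vis ++ k) + k.length ≤ pvCnt m vis :=
        pvCnt_append hndk (fun x hx => ⟨(hpk x hx).1, (hpk x hx).2.1⟩)
      obtain ⟨p2, he2, hnd2, hp2, hcl2⟩ :=
        ihf m (work ++ k) (head + 1) (vis ++ k) Vc c0
          (by simp only [List.length_append]; omega)
          (fun x hx => List.mem_append_left _ (hVc x hx))
          (by
            intro x hx
            rw [List.drop_append_of_le_length (by omega)] at hx
            rcases List.mem_append.1 hx with hx | hx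
            · refine horig x ?_
              have hdrop : work.drop head = work[head] :: work.drop (head + 1) :=
                List.drop_eq_getElem_cons h
              rw [hdrop]
              exact List.mem_cons_of_mem _ hx
            · exact Or.inr (hkNR x hx))
          (by
            intro x hx d hd hel
            rw [List.take_append_of_le_length (by omega)] at hx
            rw [List.take_add_one] at hx
            rcases List.mem_append.1 hx with hx | hx
            · exact List.mem_append_left _ (hproc x hx d hd hel)
            · have hxc : x = work[head] := by
                simp [List.getElem?_eq_getElem h] at hx
                exact hx
              rw [hxc] at hd
              exact hqk d hd hel)
          (by
            simp only [List.length_append]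
            omega)
      rw [he2]
      refine ⟨k ++ p2, ?_, ?_, ?_, ?_⟩
      · simp
      · have hp2f : ∀ y ∈ p2, y ∉ vis ++ k := fun y hy => (hp2 y hy).2.1
        simp only [List.nodup_append]
        refine ⟨hndk, hnd2, ?_⟩
        rintro y hy1 z hz rfl
        exact hp2f y hz (by simp [hy1])
      · intro x hx
        rcases List.mem_append.1 hx with hx | hx
        · exact ⟨(hpk x hx).1, (hpk x hx).2.1, hkNR x hx⟩
        · obtain ⟨hel, hnv, hnr⟩ := hp2 x hx
          exact ⟨hel, fun hm => hnv (by simp [hm]), hnr⟩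
      · intro x hx d hd hel
        have hx' : x ∈ (work ++ k) ++ p2 := by
          simp only [List.mem_append] at hx ⊢
          tauto
        have := hcl2 x hx' d hd hel
        simp only [List.mem_append] at this ⊢
        tauto
    · rw [dif_neg h]
      have heq : head = work.length := by omega
      have htake : work.take head = work := by
        rw [heq]
        exact List.take_length
      refine ⟨[], by simp, by simp, by simp, ?_⟩
      intro x hx d hd hel
      rw [List.append_nil] at hx
      rw [← htake] at hx
      exact List.mem_append_left _ (hproc x hx d hd hel)

-- ===== assembling the outer loops =====

theorem findSize_spec2 (F : Nat) (m : List (List Int)) (vis : List (Int × Int)) (i j : Int)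
    (h : pvCnt m vis < F) :
    ∃ new, findSize F i j m vis = ((new.length : Int) + 1, vis ++ new) ∧ new.Nodup ∧
      (∀ x ∈ new, pvElig m x ∧ x ∉ vis ∧ pvNR m vis (i, j) x) ∧
      (∀ x, (x = (i, j) ∨ x ∈ new) → ∀ d ∈ pvNbrs x, pvElig m d → d ∈ vis ++ new) :=
  findSize_spec F m vis (i, j) h


theorem inner_eq (m : List (List Int)) (F : Nat)
    (hF : F = m.length * (m.headD []).length + 2) :
    ∀ (qs : List (Int × Int)) (i : Int) (visA : List (Int × Int))
      (visB : PySem.Set (Int × Int)) (sizes : List Int),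
    (∀ x, x ∈ visA ↔ x ∈ visB) →
    (∀ x, x ∈ (qs.foldl
        (fun (st : List (Int × Int) × List Int) q =>
          if q.2 = 1 then
            if (i, q.1) ∉ st.1 then
              let r := findSize F i q.1 m (st.1 ++ [(i, q.1)])
              (r.2, st.2 ++ [r.1])
            else st
          else st) (visA, sizes)).1 ↔
      x ∈ (qs.foldl
        (fun (st : PySem.Set (Int × Int) × List Int) q =>
          if q.2 = 1 ∧ (i, q.1) ∉ st.1 then
            let r := bfsLoop F m [(i, q.1)] 0 (PySem.Set.add st.1 (i, q.1))
            (r.2, st.2 ++ [(r.1.length : Int)])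
          else st) (visB, sizes)).1) ∧
    (qs.foldl
        (fun (st : List (Int × Int) × List Int) q =>
          if q.2 = 1 then
            if (i, q.1) ∉ st.1 then
              let r := findSize F i q.1 m (st.1 ++ [(i, q.1)])
              (r.2, st.2 ++ [r.1])
            else st
          else st) (visA, sizes)).2 =
    (qs.foldl
        (fun (st : PySem.Set (Int × Int) × List Int) q =>
          if q.2 = 1 ∧ (i, q.1) ∉ st.1 then
            let r := bfsLoop F m [(i, q.1)] 0 (PySem.Set.add st.1 (i, q.1))
            (r.2, st.2 ++ [(r.1.length : Int)])
          else st) (visB, sizes)).2 := by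
  intro qs
  induction qs with
  | nil => exact fun i visA visB sizes hAB => ⟨hAB, rfl⟩
  | cons q qs ih =>
    intro i visA visB sizes hAB
    simp only [List.foldl_cons]
    by_cases hv : q.2 = 1
    · by_cases hm : (i, q.1) ∈ visA
      · have hmB : (i, q.1) ∈ visB := (hAB _).1 hm
        rw [if_pos hv, if_neg (fun hc => hc hm), if_neg (fun hc => hc.2 hmB)]
        exact ih i visA visB sizes hAB
      · have hmB : (i, q.1) ∉ visB := fun hc => hm ((hAB _).2 hc)
        have hcntA : pvCnt m (visA ++ [(i, q.1)]) < F := by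
          have := pvCnt_le m (visA ++ [(i, q.1)])
          omega
        obtain ⟨newA, heA, hndA, hpA, hclA⟩ := findSize_spec2 F m (visA ++ [(i, q.1)]) i q.1 hcntA
        have hcntB : (1 - 0) + pvCnt m (visB ++ [(i, q.1)]) < F := by
          have := pvCnt_le m (visB ++ [(i, q.1)])
          omega
        obtain ⟨pushed, heB, hndB, hpB, hclB⟩ :=
          bfsLoop_spec F m [(i, q.1)] 0 (visB ++ [(i, q.1)]) (visB ++ [(i, q.1)]) (i, q.1)
            (by simp) (fun x hx => hx)
            (by intro x hx; simp only [List.drop_zero, List.mem_singleton] at hx; exact Or.inl hx)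
            (by intro x hx; simp at hx)
            (by simpa using hcntB)
        rw [if_pos hv, if_pos hm, if_pos ⟨hv, hmB⟩, pvSet_add hmB, heA, heB]
        -- the two freshly visited blocks have the same members
        have hAc : ∀ x, x ∈ newA ↔ pvNR m (visA ++ [(i, q.1)]) (i, q.1) x := by
          intro x
          exact ⟨fun hx => (hpA x hx).2.2, fun hx => pvNR_subset hclA x hx⟩
        have hBc : ∀ x, x ∈ pushed ↔ pvNR m (visB ++ [(i, q.1)]) (i, q.1) x := by
          intro x
          refine ⟨fun hx => (hpB x hx).2.2, fun hx => pvNR_subset ?_ x hx⟩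
          intro y hy d hd hel
          refine hclB y ?_ d hd hel
          rcases hy with rfl | hy
          · simp
          · simp [hy]
        have hVc : ∀ z, z ∈ visA ++ [(i, q.1)] ↔ z ∈ visB ++ [(i, q.1)] := by
          intro z
          simp only [List.mem_append, List.mem_singleton]
          rw [hAB]
        have hmemEq : ∀ x, x ∈ newA ↔ x ∈ pushed := by
          intro x
          rw [hAc, hBc, pvNR_congr hVc]
        have hlen : newA.length = pushed.length :=
          ((List.perm_ext_iff_of_nodup hndA hndB).2 hmemEq).length_eq
        have hAB' : ∀ x, x ∈ visA ++ [(i, q.1)] ++ newA ↔ x ∈ visB ++ [(i, q.1)] ++ pushed := by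
          intro x
          simp only [List.mem_append, List.mem_singleton]
          rw [hAB, hmemEq]
        have hsz : ((([(i, q.1)] ++ pushed).length : Nat) : Int) = (newA.length : Int) + 1 := by
          simp [hlen]
        rw [hsz]
        exact ih i (visA ++ [(i, q.1)] ++ newA) (visB ++ [(i, q.1)] ++ pushed)
          (sizes ++ [(newA.length : Int) + 1]) hAB'
    · rw [if_neg hv, if_neg (fun hc => hv hc.1)]
      exact ih i visA visB sizes hAB


theorem outer_eq (m : List (List Int)) (F : Nat)
    (hF : F = m.length * (m.headD []).length + 2) :
    ∀ (ps : List (Int × List Int)) (visA : List (Int × Int))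
      (visB : PySem.Set (Int × Int)) (sizes : List Int),
    (∀ x, x ∈ visA ↔ x ∈ visB) →
    (∀ x, x ∈ (ps.foldl
        (fun (st : List (Int × Int) × List Int) p =>
          (PySem.List.enumerate p.2).foldl
            (fun st q =>
              if q.2 = 1 then
                if (p.1, q.1) ∉ st.1 then
                  let r := findSize F p.1 q.1 m (st.1 ++ [(p.1, q.1)])
                  (r.2, st.2 ++ [r.1])
                else st
              else st) st) (visA, sizes)).1 ↔
      x ∈ (ps.foldl
        (fun (st : PySem.Set (Int × Int) × List Int) p =>
          (PySem.List.enumerate p.2).foldl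
            (fun st q =>
              if q.2 = 1 ∧ (p.1, q.1) ∉ st.1 then
                let r := bfsLoop F m [(p.1, q.1)] 0 (PySem.Set.add st.1 (p.1, q.1))
                (r.2, st.2 ++ [(r.1.length : Int)])
              else st) st) (visB, sizes)).1) ∧
    (ps.foldl
        (fun (st : List (Int × Int) × List Int) p =>
          (PySem.List.enumerate p.2).foldl
            (fun st q =>
              if q.2 = 1 then
                if (p.1, q.1) ∉ st.1 then
                  let r := findSize F p.1 q.1 m (st.1 ++ [(p.1, q.1)])
                  (r.2, st.2 ++ [r.1])
                else st
              else st) st) (visA, sizes)).2 =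
    (ps.foldl
        (fun (st : PySem.Set (Int × Int) × List Int) p =>
          (PySem.List.enumerate p.2).foldl
            (fun st q =>
              if q.2 = 1 ∧ (p.1, q.1) ∉ st.1 then
                let r := bfsLoop F m [(p.1, q.1)] 0 (PySem.Set.add st.1 (p.1, q.1))
                (r.2, st.2 ++ [(r.1.length : Int)])
              else st) st) (visB, sizes)).2 := by
  intro ps
  induction ps with
  | nil => exact fun visA visB sizes hAB => ⟨hAB, rfl⟩
  | cons p ps ih =>
    intro visA visB sizes hAB
    simp only [List.foldl_cons]
    obtain ⟨hm1, he1⟩ := inner_eq m F hF (PySem.List.enumerate p.2) p.1 visA visB sizes hAB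
    have := ih (((PySem.List.enumerate p.2).foldl
          (fun (st : List (Int × Int) × List Int) q =>
            if q.2 = 1 then
              if (p.1, q.1) ∉ st.1 then
                let r := findSize F p.1 q.1 m (st.1 ++ [(p.1, q.1)])
                (r.2, st.2 ++ [r.1])
              else st
            else st) (visA, sizes)).1)
      (((PySem.List.enumerate p.2).foldl
          (fun (st : PySem.Set (Int × Int) × List Int) q =>
            if q.2 = 1 ∧ (p.1, q.1) ∉ st.1 then
              let r := bfsLoop F m [(p.1, q.1)] 0 (PySem.Set.add st.1 (p.1, q.1))
              (r.2, st.2 ++ [(r.1.length : Int)])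
            else st) (visB, sizes)).1)
      (((PySem.List.enumerate p.2).foldl
          (fun (st : List (Int × Int) × List Int) q =>
            if q.2 = 1 then
              if (p.1, q.1) ∉ st.1 then
                let r := findSize F p.1 q.1 m (st.1 ++ [(p.1, q.1)])
                (r.2, st.2 ++ [r.1])
              else st
            else st) (visA, sizes)).2) hm1
    have he1' :
        ((PySem.List.enumerate p.2).foldl
          (fun (st : PySem.Set (Int × Int) × List Int) q =>
            if q.2 = 1 ∧ (p.1, q.1) ∉ st.1 then
              let r := bfsLoop F m [(p.1, q.1)] 0 (PySem.Set.add st.1 (p.1, q.1))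
              (r.2, st.2 ++ [(r.1.length : Int)])
            else st) (visB, sizes)) =
        (((PySem.List.enumerate p.2).foldl
          (fun (st : PySem.Set (Int × Int) × List Int) q =>
            if q.2 = 1 ∧ (p.1, q.1) ∉ st.1 then
              let r := bfsLoop F m [(p.1, q.1)] 0 (PySem.Set.add st.1 (p.1, q.1))
              (r.2, st.2 ++ [(r.1.length : Int)])
            else st) (visB, sizes)).1,
         ((PySem.List.enumerate p.2).foldl
          (fun (st : List (Int × Int) × List Int) q =>
            if q.2 = 1 then
              if (p.1, q.1) ∉ st.1 then
                let r := findSize F p.1 q.1 m (st.1 ++ [(p.1, q.1)])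
                (r.2, st.2 ++ [r.1])
              else st
            else st) (visA, sizes)).2) := by
      rw [he1]
    rw [he1']
    exact this


-- ===== VERDICT (by name: the statement is the Claim_ definition above) =====
theorem riverSizes_spec : Claim_equal_riverSizes := by
  intro matrix _ _
  unfold Spec_riverSizes riverSizes riverSizes_alt
  exact (outer_eq matrix (matrix.length * (matrix.headD []).length + 2) rfl
    (PySem.List.enumerate matrix) [] [] [] (by simp)).2
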